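-- pv_equiv track=rewrite | github.com/Adam-Jimenez/binarysearch-editorials | Distance Pair.py | solve
-- ===== SOURCE A (Python) =====
-- def solve(nums):
--     x=[i+nums[i] for i in range(len(nums))]
--     y=[nums[j]-j for j in range(len(nums))]
--     for i in range(len(y)-2,-1,-1):
--         y[i] = max(y[i], y[i+1])
--     a=0
--     for i in range(len(x)-1):
--         a=max(a,x[i]+y[i+1])
--     return a
-- ===== SOURCE B (Python) =====
-- def solve(nums):
--     if not nums:
--         return 0
--     best = nums[0]       # running max of nums[i] + i for i seen so far
--     a = 0
--     for j in range(1, len(nums)):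
--         a = max(a, best + nums[j] - j)
--         best = max(best, nums[j] + j)
--     return a
-- ===== Notes on version B (the rewrite author's own statement) =====
-- stated objective: simpler
-- what changed: Replaces the suffix-max table y plus a separate backward pass and combining loop by one forward pass that maintains the running maximum of nums[i]+i in a single variable.
import Mathlib
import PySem

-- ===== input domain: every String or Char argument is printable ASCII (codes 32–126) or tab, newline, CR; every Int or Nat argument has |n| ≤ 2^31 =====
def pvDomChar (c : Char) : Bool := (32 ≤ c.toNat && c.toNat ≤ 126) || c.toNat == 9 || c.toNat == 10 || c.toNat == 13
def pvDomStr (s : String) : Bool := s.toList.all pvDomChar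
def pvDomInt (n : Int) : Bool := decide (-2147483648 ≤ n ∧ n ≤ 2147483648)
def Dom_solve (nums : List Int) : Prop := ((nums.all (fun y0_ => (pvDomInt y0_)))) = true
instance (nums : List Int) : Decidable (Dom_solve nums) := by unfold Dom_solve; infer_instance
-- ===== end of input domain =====

-- B replaces A's suffix-max table and its two extra passes by a single forward pass with O(1) state (objective: simpler).

-- ===== PORT A =====
def solve (nums : List Int) : Int :=
  let n : Int := nums.length
  let x := (PySem.List.pyRange 0 n 1).map (fun i => i + PySem.List.pyGetD nums i 0)
  let y := (PySem.List.pyRange 0 n 1).map (fun j => PySem.List.pyGetD nums j 0 - j)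
  let y2 := (PySem.List.pyRange (n - 2) (-1) (-1)).foldl
      (fun ys i => PySem.List.pySetD ys i
        (max (PySem.List.pyGetD ys i 0) (PySem.List.pyGetD ys (i + 1) 0))) y
  (PySem.List.pyRange 0 (n - 1) 1).foldl
      (fun a i => max a (PySem.List.pyGetD x i 0 + PySem.List.pyGetD y2 (i + 1) 0)) 0

-- ===== PORT B =====
def solve_alt (nums : List Int) : Int :=
  match nums with
  | [] => 0
  | n0 :: _ =>
    ((PySem.List.pyRange 1 (nums.length : Int) 1).foldl
      (fun (st : Int × Int) j =>
        (max st.1 (st.2 + PySem.List.pyGetD nums j 0 - j),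
         max st.2 (PySem.List.pyGetD nums j 0 + j))) (0, n0)).1

-- ===== PRECONDITION & SPEC =====
def Spec_solve (nums : List Int) (out : Int) : Prop := out = solve_alt nums
instance (nums : List Int) (out : Int) : Decidable (Spec_solve nums out) := by unfold Spec_solve; infer_instance

-- ===== CLAIM (what is proved, stated in full; the proofs are below) =====
def Claim_equal_solve : Prop := ∀ (nums : List Int), Dom_solve nums → Spec_solve nums (solve nums)

-- ===== LEMMAS AND PROOFS =====

-- pvSufQ q n k = max of q k, …, q (n-1): what A's backward pass leaves in cell k
def pvSufQ (q : ℕ → Int) (n k : ℕ) : Int :=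
  if _h : k + 1 < n then max (q k) (pvSufQ q n (k + 1)) else q k
termination_by n - k

def pvPref (p : ℕ → Int) : ℕ → Int
  | 0 => p 0
  | k + 1 => max (pvPref p k) (p (k + 1))

-- B's loop state after processing j = 1 .. t : (answer so far, running max of p i)
def pvAux (p q : ℕ → Int) : ℕ → Int × Int
  | 0 => (0, p 0)
  | t + 1 => (max (pvAux p q t).1 ((pvAux p q t).2 + q (t + 1)),
              max (pvAux p q t).2 (p (t + 1)))

lemma pvAux_snd (p q : ℕ → Int) (t : ℕ) : (pvAux p q t).2 = pvPref p t := by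
  induction t with
  | zero => rfl
  | succ t ih => simp [pvAux, pvPref, ih]

lemma pvSufQ_succ (q : ℕ → Int) (m : ℕ) : ∀ d k, m - k = d → k < m →
    pvSufQ q (m + 1) k = max (pvSufQ q m k) (q m) := by
  intro d
  induction d with
  | zero => intro k hd hk; omega
  | succ d ih =>
    intro k hd hk
    by_cases h : k + 1 < m
    · conv_lhs => rw [pvSufQ]
      conv_rhs => rw [pvSufQ]
      rw [dif_pos (show k + 1 < m + 1 by omega), dif_pos h, ih (k + 1) (by omega) h]
      omega
    · have hk1 : m = k + 1 := by omega
      subst hk1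
      have e1 : pvSufQ q (k + 1 + 1) (k + 1) = q (k + 1) := by rw [pvSufQ]; simp
      have e2 : pvSufQ q (k + 1) k = q k := by rw [pvSufQ]; simp
      conv_lhs => rw [pvSufQ]
      rw [dif_pos (show k + 1 < k + 1 + 1 by omega), e1, e2]

lemma pvSufQ_last (q : ℕ → Int) (n k : ℕ) (h : ¬ k + 1 < n) : pvSufQ q n k = q k := by
  rw [pvSufQ]; simp [h]

-- splitting a max-fold whose terms are maxes of two parts
lemma pvFoldl_max_split (f g : ℕ → Int) :
    ∀ (l : List ℕ) (c d e : Int), c = max d e →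
    l.foldl (fun a i => max a (max (f i) (g i))) c =
      max (l.foldl (fun a i => max a (f i)) d) (l.foldl (fun a i => max a (g i)) e) := by
  intro l
  induction l with
  | nil => intro c d e h; simpa using h
  | cons z t ih =>
    intro c d e h
    simp only [List.foldl_cons]
    exact ih _ _ _ (by omega)

lemma pvFoldl_row (p : ℕ → Int) (r : Int) :
    ∀ m, 1 ≤ m → (List.range m).foldl (fun a i => max a (p i + r)) 0 =
      max 0 (pvPref p (m - 1) + r) := by
  intro m
  induction m with
  | zero => omega
  | succ m ih =>
    intro _
    rcases Nat.eq_zero_or_pos m with hm | hm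
    · subst hm; simp [List.range_succ, pvPref]
    · rw [List.range_succ, List.foldl_append, ih hm]
      simp only [List.foldl_cons, List.foldl_nil]
      have hp : pvPref p m = max (pvPref p (m - 1)) (p m) := by
        obtain ⟨m', rfl⟩ := Nat.exists_eq_add_of_le hm
        simp [pvPref, Nat.add_comm]
      rw [Nat.succ_sub_one, hp]
      omega

lemma pvZero_le_fold (h : ℕ → Int) (l : List ℕ) :
    (0 : Int) ≤ l.foldl (fun a i => max a (h i)) 0 := by
  rw [← List.foldl_map]
  exact (PySem.List.le_foldl_max (l.map h) 0).1

-- A's combining loop written over Nat indices, for m elements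
def pvAval (p q : ℕ → Int) (m : ℕ) : Int :=
  (List.range (m - 1)).foldl (fun a i => max a (p i + pvSufQ q m (i + 1))) 0

lemma pvAval_succ (p q : ℕ → Int) (m : ℕ) (hm : 1 ≤ m) :
    pvAval p q (m + 1) = max (pvAval p q m) (pvPref p (m - 1) + q m) := by
  unfold pvAval
  rw [Nat.succ_sub_one]
  have hsplit : (List.range m) = List.range (m - 1) ++ [m - 1] := by
    conv_lhs => rw [show m = (m - 1) + 1 from by omega, List.range_succ]
  rw [hsplit, List.foldl_append]
  have hcongr : (List.range (m - 1)).foldl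
      (fun a i => max a (p i + pvSufQ q (m + 1) (i + 1))) 0 =
      (List.range (m - 1)).foldl
      (fun a i => max a (max (p i + pvSufQ q m (i + 1)) (p i + q m))) 0 := by
    apply PySem.List.foldl_congr_mem
    intro a i hi
    rw [pvSufQ_succ q m (m - (i + 1)) (i + 1) rfl (by simp at hi; omega)]
    omega
  rw [hcongr, pvFoldl_max_split (fun i => p i + pvSufQ q m (i + 1)) (fun i => p i + q m)
      (List.range (m - 1)) 0 0 0 (by omega)]
  simp only [List.foldl_cons, List.foldl_nil]
  rw [show m - 1 + 1 = m from by omega, pvSufQ_last q (m + 1) m (by omega)]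
  have hrow : max ((List.range (m - 1)).foldl (fun a i => max a (p i + q m)) 0)
      (p (m - 1) + q m) = (List.range m).foldl (fun a i => max a (p i + q m)) 0 := by
    rw [hsplit, List.foldl_append]; simp
  rw [max_assoc, hrow, pvFoldl_row p (q m) m hm]
  have h0 : (0 : Int) ≤ (List.range (m - 1)).foldl
      (fun a i => max a (p i + pvSufQ q m (i + 1))) 0 := pvZero_le_fold _ _
  omega

lemma pvAval_eq_aux (p q : ℕ → Int) : ∀ m, 1 ≤ m → pvAval p q m = (pvAux p q (m - 1)).1 := by
  intro m
  induction m with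
  | zero => omega
  | succ m ih =>
    intro _
    rcases Nat.eq_zero_or_pos m with hm | hm
    · subst hm; simp [pvAval, pvAux]
    · rw [pvAval_succ p q m hm, ih hm, Nat.succ_sub_one]
      obtain ⟨m', rfl⟩ := Nat.exists_eq_add_of_le hm
      simp [pvAux, pvAux_snd, Nat.add_comm]

-- ===== A-side bridge =====

-- the backward suffix-max loop: after running indices s, s-1, …, 0, every cell holds pvSufQ
lemma pvBackLoop (q : ℕ → Int) (N : ℕ) :
    ∀ (s : ℕ) (ys : List Int), ys.length = N → s + 2 ≤ N →
    (∀ k, k ≤ s → ys.getD k 0 = q k) →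
    (∀ k, s < k → k < N → ys.getD k 0 = pvSufQ q N k) →
    ∀ k, k < N →
      ((PySem.List.pyRange (s : Int) (-1) (-1)).foldl
        (fun ys i => PySem.List.pySetD ys i
          (max (PySem.List.pyGetD ys i 0) (PySem.List.pyGetD ys (i + 1) 0))) ys).getD k 0
      = pvSufQ q N k := by
  intro s
  induction s with
  | zero =>
    intro ys hl hs hlo hhi k hk
    rw [PySem.List.pyRange_neg_one_cons (by omega : (-1 : Int) < ((0 : ℕ) : Int)),
        PySem.List.pyRange_neg_one_eq_nil (by omega)]
    simp only [List.foldl_cons, List.foldl_nil]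
    rw [PySem.List.pySetD_natCast, PySem.List.pyGetD_natCast,
        show (((0 : ℕ) : Int) + 1) = ((1 : ℕ) : Int) from by norm_num,
        PySem.List.pyGetD_natCast]
    have hval : max (ys.getD 0 0) (ys.getD 1 0) = pvSufQ q N 0 := by
      rw [hlo 0 (by omega), hhi 1 (by omega) (by omega)]
      conv_rhs => rw [pvSufQ]
      rw [dif_pos (by omega : 0 + 1 < N)]
    rw [hval]
    rcases Nat.eq_zero_or_pos k with hk0 | hk0
    · subst hk0
      rw [List.getD_eq_getElem?_getD, List.getElem?_set, if_pos rfl, if_pos (by omega)]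
      rfl
    · rw [List.getD_eq_getElem?_getD, List.getElem?_set, if_neg (by omega),
          ← List.getD_eq_getElem?_getD]
      exact hhi k (by omega) hk
  | succ s ih =>
    intro ys hl hs hlo hhi k hk
    rw [PySem.List.pyRange_neg_one_cons (by omega : (-1 : Int) < ((s + 1 : ℕ) : Int))]
    simp only [List.foldl_cons]
    rw [PySem.List.pySetD_natCast, PySem.List.pyGetD_natCast,
        show ((s + 1 : ℕ) : Int) + 1 = ((s + 2 : ℕ) : Int) from by push_cast; ring,
        PySem.List.pyGetD_natCast,
        show ((s + 1 : ℕ) : Int) - 1 = ((s : ℕ) : Int) from by push_cast; ring]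
    have hval : max (ys.getD (s + 1) 0) (ys.getD (s + 2) 0) = pvSufQ q N (s + 1) := by
      rw [hlo (s + 1) (by omega), hhi (s + 2) (by omega) (by omega)]
      conv_rhs => rw [pvSufQ]
      rw [dif_pos (by omega : s + 1 + 1 < N)]
    rw [hval]
    apply ih
    · simpa using hl
    · omega
    · intro j hj
      rw [List.getD_eq_getElem?_getD, List.getElem?_set, if_neg (by omega),
          ← List.getD_eq_getElem?_getD]
      exact hlo j (by omega)
    · intro j hj hjN
      rcases Nat.eq_or_lt_of_le hj with hje | hjl
      · rw [List.getD_eq_getElem?_getD, List.getElem?_set, ← hje, if_pos rfl,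
            if_pos (by omega)]
        rfl
      · rw [List.getD_eq_getElem?_getD, List.getElem?_set, if_neg (by omega),
            ← List.getD_eq_getElem?_getD]
        exact hhi j (by omega) hjN
    · exact hk

lemma pvSolve_eq_aval (nums : List Int) (h2 : 2 ≤ nums.length) :
    solve nums = pvAval (fun i => (i : Int) + nums.getD i 0) (fun j => nums.getD j 0 - (j : Int))
      nums.length := by
  simp only [solve]
  unfold pvAval
  set N := nums.length with hN
  set p : ℕ → Int := fun i => (i : Int) + nums.getD i 0 with hp
  set q : ℕ → Int := fun j => nums.getD j 0 - (j : Int) with hq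
  set y := (PySem.List.pyRange 0 (N : Int) 1).map (fun j => PySem.List.pyGetD nums j 0 - j) with hy
  -- the backward loop result
  have hylen : y.length = N := by
    simp [hy, PySem.List.length_pyRange_one]
  have hy2 : ∀ k, k < N →
      ((PySem.List.pyRange ((N : Int) - 2) (-1) (-1)).foldl
        (fun ys i => PySem.List.pySetD ys i
          (max (PySem.List.pyGetD ys i 0) (PySem.List.pyGetD ys (i + 1) 0))) y).getD k 0
      = pvSufQ q N k := by
    have hyget : ∀ k, k < N → y.getD k 0 = q k := by
      intro k hk
      rw [hy, List.getD_eq_getElem?_getD, PySem.List.getElem?_map_pyRange_zero _ N k hk]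
      simp [hq]
    rw [show ((N : Int) - 2) = ((N - 2 : ℕ) : Int) from by omega]
    intro k hk
    apply pvBackLoop q N (N - 2) y hylen (by omega)
    · intro j hj; exact hyget j (by omega)
    · intro j hj hjN
      rw [hyget j hjN, pvSufQ_last q N j (by omega)]
    · exact hk
  -- the combining loop
  rw [PySem.List.pyRange_one 0 ((N : Int) - 1), List.foldl_map,
      show ((N : Int) - 1 - 0).toNat = N - 1 from by omega]
  apply PySem.List.foldl_congr_mem
  intro a k hk
  have hkN : k < N - 1 := by simpa using hk
  rw [show (0 : Int) + (k : Int) = ((k : ℕ) : Int) from by ring]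
  rw [PySem.List.pyGetD_map_pyRange _ N k _ (by omega),
      show ((k : ℕ) : Int) + 1 = ((k + 1 : ℕ) : Int) from by push_cast; ring]
  simp only [PySem.List.pyGetD_natCast]
  rw [hy2 (k + 1) (by omega)]

-- ===== B-side bridge =====
lemma pvSolveAlt_eq_aux (n0 : Int) (rest : List Int) :
    solve_alt (n0 :: rest) =
    (pvAux (fun i => (i : Int) + (n0 :: rest).getD i 0)
           (fun j => (n0 :: rest).getD j 0 - (j : Int)) rest.length).1 := by
  simp only [solve_alt]
  set p : ℕ → Int := fun i => (i : Int) + (n0 :: rest).getD i 0 with hp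
  set q : ℕ → Int := fun j => (n0 :: rest).getD j 0 - (j : Int) with hq
  rw [PySem.List.pyRange_one 1 ((n0 :: rest).length : Int), List.foldl_map,
      show (((n0 :: rest).length : Int) - 1).toNat = rest.length from by simp]
  have key : ∀ t : ℕ, (List.range t).foldl
      (fun (st : Int × Int) (k : ℕ) =>
        (max st.1 (st.2 + PySem.List.pyGetD (n0 :: rest) (1 + (k : Int)) 0 - (1 + (k : Int))),
         max st.2 (PySem.List.pyGetD (n0 :: rest) (1 + (k : Int)) 0 + (1 + (k : Int))))) (0, n0)
      = pvAux p q t := by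
    intro t
    induction t with
    | zero =>
      simp [pvAux, hp]
    | succ t ih =>
      rw [List.range_succ, List.foldl_append, ih]
      simp only [List.foldl_cons, List.foldl_nil]
      rw [show (1 : Int) + (t : Int) = ((t + 1 : ℕ) : Int) from by push_cast; ring,
          PySem.List.pyGetD_natCast]
      rw [pvAux]
      simp only [Prod.mk.injEq]
      refine ⟨?_, ?_⟩ <;> (simp only [hp, hq]; omega)
  exact congrArg Prod.fst (key rest.length)

-- ===== VERDICT (by name: the statement is the Claim_ definition above) =====
theorem solve_spec : Claim_equal_solve := by
  intro nums _
  unfold Spec_solve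
  match nums with
  | [] => rfl
  | [n0] =>
    show solve [n0] = solve_alt [n0]
    simp [solve, solve_alt, PySem.List.pyRange_one_eq_nil, PySem.List.pyRange_neg_one_eq_nil]
  | n0 :: n1 :: rest =>
    show solve (n0 :: n1 :: rest) = solve_alt (n0 :: n1 :: rest)
    rw [pvSolveAlt_eq_aux n0 (n1 :: rest),
        pvSolve_eq_aval (n0 :: n1 :: rest) (by simp),
        pvAval_eq_aux _ _ _ (by simp)]
    norm_num
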